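-- pv_equiv track=rewrite | github.com/clmentcoutet/graphe | src/graph/tests/cycled_graph_to_dag.py | filter_reachable_states
-- ===== SOURCE A (Python) =====
-- def filter_reachable_states(state_graph, start_state):
--     """
--     Filter the state graph to include only states reachable from the start_state.
--     """
--     reachable = set()
--     stack = [start_state]
--     while stack:
--         current = stack.pop()
--         if current not in reachable:
--             reachable.add(current)
--             for neighbor in state_graph.get(current, []):
--                 if neighbor not in reachable:
--                     stack.append(neighbor)
--     return {state: [nbr for nbr in neighbors if nbr in reachable]
--             for state, neighbors in state_graph.items() if state in reachable}
-- ===== SOURCE B (Python) =====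
-- def filter_reachable_states(state_graph, start_state):
--     """
--     Filter the state graph to include only states reachable from the start_state.
--     (Recursive depth-first search instead of the explicit-stack while-loop.)
--     """
--     reachable = set()
--
--     def visit(node):
--         if node not in reachable:
--             reachable.add(node)
--             for neighbor in state_graph.get(node, []):
--                 visit(neighbor)
--
--     visit(start_state)
--     return {state: [nbr for nbr in neighbors if nbr in reachable]
--             for state, neighbors in state_graph.items() if state in reachable}
-- ===== Notes on version B (the rewrite author's own statement) =====
-- stated objective: alternative
-- what changed: The explicit-stack while-loop with its pop/re-check discipline is replaced by a recursive depth-first search (an inner visit() that marks the node and recurses on its neighbors); the final filtering comprehension is unchanged.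
import Mathlib
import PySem

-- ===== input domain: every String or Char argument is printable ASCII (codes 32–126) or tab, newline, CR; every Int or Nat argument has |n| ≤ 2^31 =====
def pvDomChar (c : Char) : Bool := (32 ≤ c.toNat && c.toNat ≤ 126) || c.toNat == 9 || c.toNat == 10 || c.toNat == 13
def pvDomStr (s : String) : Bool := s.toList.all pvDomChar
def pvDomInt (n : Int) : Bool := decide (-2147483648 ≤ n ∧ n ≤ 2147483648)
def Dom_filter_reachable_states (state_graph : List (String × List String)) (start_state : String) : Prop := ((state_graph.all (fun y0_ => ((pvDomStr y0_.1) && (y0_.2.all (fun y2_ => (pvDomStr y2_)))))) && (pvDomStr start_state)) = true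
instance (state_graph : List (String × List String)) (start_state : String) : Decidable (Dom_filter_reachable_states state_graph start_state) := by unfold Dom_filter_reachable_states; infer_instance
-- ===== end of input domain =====

-- B replaces A's explicit-stack while-loop by a recursive depth-first search (inner visit helper);
-- the final filtering of the graph is unchanged, and the computed reachable set has the same members.

-- ----- termination helpers (cited by the ports' decreasing_by) -----

-- number of graph keys not yet in the visited set r (strictly drops when a fresh key is visited)
def pvNewKeys (g : List (String × List String)) (r : PySem.Set String) : Nat :=
  ((PySem.Set.ofList (g.map Prod.fst)).filter (fun k => !(PySem.Set.contains r k))).length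

-- total number of neighbor entries in the graph
def pvTotalN (g : List (String × List String)) : Nat :=
  (g.map (fun p => p.2.length)).sum

theorem pvFilter_length_lt {α : Type} (l : List α) (p q : α → Bool)
    (himp : ∀ a, q a = true → p a = true) (x : α) (hx : x ∈ l) (hp : p x = true)
    (hq : q x = false) : (l.filter q).length < (l.filter p).length := by
  induction l with
  | nil => cases hx
  | cons a t ih =>
    have hmono := List.Sublist.length_le (List.monotone_filter_right t himp)
    rcases List.mem_cons.1 hx with rfl | hxt
    · simp only [List.filter_cons, hp, hq, if_true, if_false, Bool.false_eq_true,
        List.length_cons]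
      omega
    · by_cases hqa : q a = true
      · have hpa := himp a hqa
        simp only [List.filter_cons, hqa, hpa, if_true, List.length_cons]
        exact Nat.succ_lt_succ (ih hxt)
      · have h := ih hxt
        by_cases hpa : p a = true <;>
          simp only [List.filter_cons, hqa, hpa, if_true, if_false, Bool.false_eq_true,
            List.length_cons] <;> omega

theorem pvNewKeys_mono (g : List (String × List String)) (r r' : PySem.Set String)
    (h : ∀ y, y ∈ r → y ∈ r') : pvNewKeys g r' ≤ pvNewKeys g r := by
  apply List.Sublist.length_le
  apply List.monotone_filter_right
  intro a ha
  simp only [Bool.not_eq_true'] at ha ⊢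
  cases hc : PySem.Set.contains r a
  · rfl
  · have := (PySem.Set.contains_iff r' a).2 (h a ((PySem.Set.contains_iff r a).1 hc))
    rw [this] at ha
    cases ha

theorem pvNewKeys_lt (g : List (String × List String)) (r : PySem.Set String) (c : String)
    (hk : c ∈ g.map Prod.fst) (hc : c ∉ r) :
    pvNewKeys g (PySem.Set.add r c) < pvNewKeys g r := by
  have himp : ∀ a : String, (!(PySem.Set.contains (PySem.Set.add r c) a)) = true →
      (!(PySem.Set.contains r a)) = true := by
    intro a ha
    simp only [Bool.not_eq_true'] at ha ⊢
    cases hca : PySem.Set.contains r a with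
    | false => rfl
    | true =>
      have := (PySem.Set.contains_iff (PySem.Set.add r c) a).2
        ((PySem.Set.mem_add r c a).2 (Or.inl ((PySem.Set.contains_iff r a).1 hca)))
      rw [this] at ha
      cases ha
  have hp : (!(PySem.Set.contains r c)) = true := by
    simp only [Bool.not_eq_true']
    cases hcc : PySem.Set.contains r c with
    | false => rfl
    | true => exact absurd ((PySem.Set.contains_iff r c).1 hcc) hc
  have hq : (!(PySem.Set.contains (PySem.Set.add r c) c)) = false := by
    have h1 : PySem.Set.contains (PySem.Set.add r c) c = true :=
      (PySem.Set.contains_iff (PySem.Set.add r c) c).2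
        ((PySem.Set.mem_add r c c).2 (Or.inr rfl))
    rw [h1]
    rfl
  exact pvFilter_length_lt _ _ _ himp c ((PySem.Set.mem_ofList (g.map Prod.fst) c).2 hk) hp hq

-- adding a non-key leaves the count of uncovered keys unchanged
theorem pvNewKeys_add_nonkey (g : List (String × List String)) (r : PySem.Set String) (c : String)
    (hk : c ∉ g.map Prod.fst) : pvNewKeys g (PySem.Set.add r c) = pvNewKeys g r := by
  unfold pvNewKeys
  congr 1
  apply List.filter_congr
  intro k hkmem
  have hkc : k ≠ c := fun h =>
    hk (by rw [← h]; exact (PySem.Set.mem_ofList (g.map Prod.fst) k).1 hkmem)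
  cases hcr : PySem.Set.contains r k with
  | true =>
    have : PySem.Set.contains (PySem.Set.add r c) k = true :=
      (PySem.Set.contains_iff _ k).2 ((PySem.Set.mem_add r c k).2
        (Or.inl ((PySem.Set.contains_iff r k).1 hcr)))
    rw [this]
  | false =>
    have : PySem.Set.contains (PySem.Set.add r c) k = false := by
      cases hca : PySem.Set.contains (PySem.Set.add r c) k with
      | false => rfl
      | true =>
        rcases (PySem.Set.mem_add r c k).1 ((PySem.Set.contains_iff _ k).1 hca) with h | h
        · rw [(PySem.Set.contains_iff r k).2 h] at hcr; cases hcr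
        · exact absurd h hkc
    rw [this]

-- lexicographic helper for the pair measure
theorem pvLexHelp {a b c d : Nat} (h1 : a ≤ c) (h2 : b < d) :
    Prod.Lex (· < ·) (· < ·) (a, b) (c, d) := by
  rcases lt_or_eq_of_le h1 with h | h
  · exact Prod.Lex.left _ _ h
  · subst h; exact Prod.Lex.right _ h2

theorem pvNbrs_len_le (g : List (String × List String)) (c : String) :
    ((List.lookup c g).getD []).length ≤ pvTotalN g := by
  cases h : List.lookup c g with
  | none => simp [pvTotalN]
  | some v =>
    rcases List.lookup_eq_some_iff.1 h with ⟨l₁, l₂, rfl, -⟩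
    simp only [Option.getD_some, pvTotalN, List.map_append, List.map_cons, List.sum_append,
      List.sum_cons]
    omega

-- foldl of conditional pushes is filter-reverse-append
theorem pvPush_eq (ns rest : List String) (p : String → Bool) :
    ns.foldl (fun st n => if p n then st else n :: st) rest
      = (ns.filter (fun n => !(p n))).reverse ++ rest := by
  induction ns generalizing rest with
  | nil => simp
  | cons a t ih =>
    by_cases hp : p a = true <;>
      simp [hp, ih, List.append_assoc]

theorem pvPush_len_le (ns rest : List String) (p : String → Bool) :
    (ns.foldl (fun st n => if p n then st else n :: st) rest).length ≤ ns.length + rest.length := by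
  rw [pvPush_eq]
  simp only [List.length_append, List.length_reverse]
  have := List.length_filter_le (fun n => !(p n)) ns
  omega

theorem pvNotKey_lookup (g : List (String × List String)) (c : String)
    (h : ¬ c ∈ g.map Prod.fst) : (List.lookup c g).getD [] = ([] : List String) := by
  have : List.lookup c g = none := by
    apply List.lookup_eq_none_iff.2
    intro p hp
    simp only [bne_iff_ne, ne_eq]
    intro hc
    exact h (List.mem_map.2 ⟨p, hp, hc.symm⟩)
  simp [this]

-- ===== PORT A =====

-- state_graph.get(current, [])
def pvGetA (g : List (String × List String)) (c : String) : List String :=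
  (List.lookup c g).getD []

-- A's while-loop over the explicit stack; the Lean list holds the stack top at its HEAD
-- (i.e. it is Python's stack reversed), so pop() is the head and each append pushes to the front.
def pvLoopA (g : List (String × List String)) (r : PySem.Set String) (stack : List String) :
    PySem.Set String :=
  match stack with
  | [] => r
  | current :: rest =>
    if PySem.Set.contains r current then
      pvLoopA g r rest
    else
      pvLoopA g (PySem.Set.add r current)
        ((pvGetA g current).foldl
          (fun st n => if PySem.Set.contains (PySem.Set.add r current) n then st else n :: st)
          rest)
termination_by pvNewKeys g r * (pvTotalN g + 1) + stack.length
decreasing_by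
  · simp only [List.length_cons]
    omega
  · rename_i hc
    simp only [dite_eq_ite]
    have hcr : current ∉ r := by
      intro hm; exact hc ((PySem.Set.contains_iff r current).2 hm)
    have hpush := pvPush_len_le (pvGetA g current) rest
      (fun n => PySem.Set.contains (PySem.Set.add r current) n)
    have hnb : (pvGetA g current).length ≤ pvTotalN g := pvNbrs_len_le g current
    by_cases hk : current ∈ g.map Prod.fst
    · have hlt := pvNewKeys_lt g r current hk hcr
      have hmul : (pvNewKeys g (PySem.Set.add r current) + 1) * (pvTotalN g + 1) ≤
          pvNewKeys g r * (pvTotalN g + 1) :=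
        Nat.mul_le_mul_right _ hlt
      rw [Nat.succ_mul] at hmul
      simp only [List.length_cons]
      omega
    · have hlen : (pvGetA g current).length = 0 := by
        have h0 : pvGetA g current = [] := pvNotKey_lookup g current hk
        rw [h0]
        rfl
      have hmono := pvNewKeys_mono g r (PySem.Set.add r current)
        (fun y hy => (PySem.Set.mem_add r current y).2 (Or.inl hy))
      have hmul : pvNewKeys g (PySem.Set.add r current) * (pvTotalN g + 1) ≤
          pvNewKeys g r * (pvTotalN g + 1) := Nat.mul_le_mul_right _ hmono
      simp only [List.length_cons]
      omega

def filter_reachable_states (state_graph : List (String × List String)) (start_state : String) :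
    List (String × List String) :=
  let reachable := pvLoopA state_graph PySem.Set.empty [start_state]
  (state_graph.filter (fun p => PySem.Set.contains reachable p.1)).map
    (fun p => (p.1, p.2.filter (fun n => PySem.Set.contains reachable n)))

-- ===== PORT B =====

-- state_graph.get(node, [])
def pvGetB (g : List (String × List String)) (c : String) : List String :=
  (List.lookup c g).getD []

-- B's recursive visit; the list argument is the worklist of the surrounding 'for' loop
-- (visit(node) = pvVisit g r [node]).  The subtype records that the visited set only grows,
-- which the nested recursion's termination argument needs.
def pvVisit (g : List (String × List String)) (r : PySem.Set String) (nodes : List String) :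
    { r' : PySem.Set String // ∀ x ∈ r, x ∈ r' } :=
  match nodes with
  | [] => ⟨r, fun _ h => h⟩
  | n :: rest =>
    if PySem.Set.contains r n then
      let o := pvVisit g r rest
      ⟨o.1, o.2⟩
    else
      let i := pvVisit g (PySem.Set.add r n) (pvGetB g n)
      let o := pvVisit g i.1 rest
      ⟨o.1, fun x hx => o.2 x (i.2 x ((PySem.Set.mem_add r n x).2 (Or.inl hx)))⟩
termination_by (pvNewKeys g r, nodes.length)
decreasing_by
  · exact pvLexHelp (Nat.le_refl _) (by simp)
  · rename_i hc
    have hcr : n ∉ r := fun hm => hc ((PySem.Set.contains_iff r n).2 hm)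
    by_cases hk : n ∈ g.map Prod.fst
    · exact Prod.Lex.left _ _ (pvNewKeys_lt g r n hk hcr)
    · have hnil : pvGetB g n = [] := pvNotKey_lookup g n hk
      refine pvLexHelp (le_of_eq (pvNewKeys_add_nonkey g r n hk)) ?_
      rw [hnil]
      simp
  · rename_i hc
    have hcr : n ∉ r := fun hm => hc ((PySem.Set.contains_iff r n).2 hm)
    by_cases hk : n ∈ g.map Prod.fst
    · refine Prod.Lex.left _ _
        (lt_of_le_of_lt (pvNewKeys_mono g (PySem.Set.add r n) _ ?_)
          (pvNewKeys_lt g r n hk hcr))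
      exact Subtype.prop (p := fun r' => ∀ y ∈ PySem.Set.add r n, y ∈ r') _
    · refine pvLexHelp
        (le_trans (pvNewKeys_mono g (PySem.Set.add r n) _ ?_)
          (le_of_eq (pvNewKeys_add_nonkey g r n hk))) ?_
      · exact Subtype.prop (p := fun r' => ∀ y ∈ PySem.Set.add r n, y ∈ r') _
      · simp

def filter_reachable_states_alt (state_graph : List (String × List String)) (start_state : String) :
    List (String × List String) :=
  let reachable := (pvVisit state_graph PySem.Set.empty [start_state]).1
  (state_graph.filter (fun p => PySem.Set.contains reachable p.1)).map
    (fun p => (p.1, p.2.filter (fun n => PySem.Set.contains reachable n)))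

-- ===== PRECONDITION & SPEC =====
def Spec_filter_reachable_states (state_graph : List (String × List String)) (start_state : String) (out : List (String × List String)) : Prop := out = filter_reachable_states_alt state_graph start_state
instance (state_graph : List (String × List String)) (start_state : String) (out : List (String × List String)) : Decidable (Spec_filter_reachable_states state_graph start_state out) := by unfold Spec_filter_reachable_states; infer_instance

-- ===== CLAIM (what is proved, stated in full; the proofs are below) =====
def Claim_equal_filter_reachable_states : Prop := ∀ (state_graph : List (String × List String)) (start_state : String), Dom_filter_reachable_states state_graph start_state → Spec_filter_reachable_states state_graph start_state (filter_reachable_states state_graph start_state)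

-- ===== LEMMAS AND PROOFS =====

-- reachability from s avoiding the visited set r: every node on the path is outside r
inductive pvRA (g : List (String × List String)) (r : PySem.Set String) : String → String → Prop
  | refl (s : String) (h : s ∉ r) : pvRA g r s s
  | step (s t x : String) (hs : s ∉ r) (ht : t ∈ (List.lookup s g).getD [])
      (hx : pvRA g r t x) : pvRA g r s x

theorem pvRA_not_mem {g : List (String × List String)} {r : PySem.Set String} {s x : String}
    (h : pvRA g r s x) : s ∉ r := by
  cases h with
  | refl _ h => exact h
  | step _ _ _ hs _ _ => exact hs

theorem pvRA_anti {g : List (String × List String)} {r r' : PySem.Set String}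
    (hsub : ∀ y, y ∈ r' → y ∈ r) {s x : String} (h : pvRA g r s x) : pvRA g r' s x := by
  induction h with
  | refl s hs => exact pvRA.refl s (fun hm => hs (hsub s hm))
  | step s t x hs ht _ ih => exact pvRA.step s t x (fun hm => hs (hsub s hm)) ht ih

theorem pvRA_snoc {g : List (String × List String)} {r : PySem.Set String} {s t u : String}
    (h : pvRA g r s t) (hu : u ∈ (List.lookup t g).getD []) (hur : u ∉ r) : pvRA g r s u := by
  induction h with
  | refl a ha => exact pvRA.step a u u ha hu (pvRA.refl u hur)
  | step a b x ha hb _ ih => exact pvRA.step a b u ha hb (ih hu)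

theorem pvRA_split {g : List (String × List String)} {r : PySem.Set String} (c : String)
    {s x : String} (h : pvRA g r s x) :
    pvRA g (PySem.Set.add r c) s x ∨
      (pvRA g r s c ∧ (x = c ∨ ∃ n ∈ (List.lookup c g).getD [], pvRA g (PySem.Set.add r c) n x)) := by
  induction h with
  | refl s hs =>
    by_cases hsc : s = c
    · subst hsc; exact Or.inr ⟨pvRA.refl s hs, Or.inl rfl⟩
    · exact Or.inl (pvRA.refl s (fun hm => ((PySem.Set.mem_add r c s).1 hm).elim hs hsc))
  | step s t x hs ht _ ih =>
    by_cases hsc : s = c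
    · subst hsc
      rcases ih with h1 | ⟨h1, h2⟩
      · exact Or.inr ⟨pvRA.refl s hs, Or.inr ⟨t, ht, h1⟩⟩
      · exact Or.inr ⟨pvRA.refl s hs, h2⟩
    · rcases ih with h1 | ⟨h1, h2⟩
      · exact Or.inl (pvRA.step s t x (fun hm => ((PySem.Set.mem_add r c s).1 hm).elim hs hsc) ht h1)
      · exact Or.inr ⟨pvRA.step s t c hs ht h1, h2⟩

theorem pvRA_hop {g : List (String × List String)} {r : PySem.Set String} {c x : String}
    (hc : c ∉ r) :
    (x ∈ r ∨ pvRA g r c x) ↔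
      (x ∈ PySem.Set.add r c ∨ ∃ n ∈ (List.lookup c g).getD [], pvRA g (PySem.Set.add r c) n x) := by
  constructor
  · rintro (hx | hx)
    · exact Or.inl ((PySem.Set.mem_add r c x).2 (Or.inl hx))
    · rcases pvRA_split c hx with h1 | ⟨-, h2⟩
      · exact absurd ((PySem.Set.mem_add r c c).2 (Or.inr rfl)) (pvRA_not_mem h1)
      · rcases h2 with h2 | h2
        · cases h2
          exact Or.inl ((PySem.Set.mem_add r _ _).2 (Or.inr rfl))
        · exact Or.inr h2
  · rintro (hx | ⟨n, hn, hx⟩)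
    · rcases (PySem.Set.mem_add r c x).1 hx with hx | rfl
      · exact Or.inl hx
      · exact Or.inr (pvRA.refl x hc)
    · have h1 : pvRA g r n x :=
        pvRA_anti (fun y hy => (PySem.Set.mem_add r c y).2 (Or.inl hy)) hx
      exact Or.inr (pvRA.step c n x hc hn h1)

-- enlarging the avoid set by already-reached/visited nodes changes nothing
theorem pvRA_absorb {g : List (String × List String)} {r : PySem.Set String} {n : String}
    (R' : PySem.Set String) (hR : ∀ y, y ∈ R' ↔ (y ∈ r ∨ pvRA g r n y)) (s x : String) :
    (x ∈ R' ∨ pvRA g R' s x) ↔ (x ∈ R' ∨ pvRA g r s x) := by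
  constructor
  · rintro (hx | hx)
    · exact Or.inl hx
    · exact Or.inr (pvRA_anti (fun y hy => (hR y).2 (Or.inl hy)) hx)
  · rintro (hx | hx)
    · exact Or.inl hx
    · induction hx with
      | refl a ha =>
        by_cases hm : a ∈ R'
        · exact Or.inl hm
        · exact Or.inr (pvRA.refl a hm)
      | step a b x ha hb hbx ih =>
        rcases ih with h1 | h1
        · exact Or.inl h1
        · by_cases hm : a ∈ R'
          · exfalso
            have hbr : b ∉ r := fun hbr => pvRA_not_mem h1 ((hR b).2 (Or.inl hbr))
            have hbR : b ∈ R' := by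
              rcases (hR a).1 hm with h2 | h2
              · exact absurd h2 ha
              · exact (hR b).2 (Or.inr (pvRA_snoc h2 hb hbr))
            exact pvRA_not_mem h1 hbR
          · exact Or.inr (pvRA.step a b x hm hb h1)

theorem pvLoopA_mem (g : List (String × List String)) (r : PySem.Set String)
    (stack : List String) :
    ∀ x, x ∈ pvLoopA g r stack ↔ x ∈ r ∨ ∃ s ∈ stack, pvRA g r s x := by
  fun_induction pvLoopA g r stack with
  | case1 r => intro x; simp
  | case2 r current rest hc ih =>
    intro x
    have hcur : current ∈ r := (PySem.Set.contains_iff r current).1 hc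
    rw [ih x]
    simp only [List.mem_cons]
    constructor
    · rintro (hx | ⟨s, hs, hsx⟩)
      · exact Or.inl hx
      · exact Or.inr ⟨s, Or.inr hs, hsx⟩
    · rintro (hx | ⟨s, rfl | hs, hsx⟩)
      · exact Or.inl hx
      · exact absurd hcur (pvRA_not_mem hsx)
      · exact Or.inr ⟨s, hs, hsx⟩
  | case3 r current rest hc ih =>
    intro x
    simp only [dite_eq_ite] at ih
    have hcur : current ∉ r := fun hm => hc ((PySem.Set.contains_iff r current).2 hm)
    rw [ih x, pvPush_eq]
    simp only [List.mem_append, List.mem_reverse, List.mem_filter, List.mem_cons,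
      Bool.not_eq_true']
    have hmono : ∀ y : String, y ∈ r → y ∈ PySem.Set.add r current :=
      fun y hy => (PySem.Set.mem_add r current y).2 (Or.inl hy)
    constructor
    · rintro (hx | ⟨s, hs, hsx⟩)
      · cases (pvRA_hop (g := g) (c := current) (x := x) hcur).2 (Or.inl hx) with
        | inl h => exact Or.inl h
        | inr h => exact Or.inr ⟨current, Or.inl rfl, h⟩
      · rcases hs with ⟨hsn, hcf⟩ | hs
        · cases (pvRA_hop (g := g) (c := current) (x := x) hcur).2 (Or.inr ⟨s, hsn, hsx⟩) with
          | inl h => exact Or.inl h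
          | inr h => exact Or.inr ⟨current, Or.inl rfl, h⟩
        · exact Or.inr ⟨s, Or.inr hs, pvRA_anti hmono hsx⟩
    · rintro (hx | ⟨s, rfl | hs, hsx⟩)
      · exact Or.inl ((PySem.Set.mem_add r current x).2 (Or.inl hx))
      · cases (pvRA_hop (g := g) (c := s) (x := x) hcur).1 (Or.inr hsx) with
        | inl h => exact Or.inl h
        | inr h =>
          obtain ⟨n, hn, hnx⟩ := h
          refine Or.inr ⟨n, Or.inl ⟨hn, ?_⟩, hnx⟩
          have hnm := pvRA_not_mem hnx
          cases hcn : PySem.Set.contains (PySem.Set.add r s) n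
          · rfl
          · exact absurd ((PySem.Set.contains_iff (PySem.Set.add r s) n).1 hcn) hnm
      · rcases pvRA_split current hsx with h1 | ⟨-, h2⟩
        · exact Or.inr ⟨s, Or.inr hs, h1⟩
        · rcases h2 with h2 | ⟨n, hn, hnx⟩
          · cases h2
            exact Or.inl ((PySem.Set.mem_add r _ _).2 (Or.inr rfl))
          · refine Or.inr ⟨n, Or.inl ⟨hn, ?_⟩, hnx⟩
            have hnm := pvRA_not_mem hnx
            cases hcn : PySem.Set.contains (PySem.Set.add r current) n
            · rfl
            · exact absurd ((PySem.Set.contains_iff (PySem.Set.add r current) n).1 hcn) hnm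

theorem pvVisit_mem (g : List (String × List String)) (r : PySem.Set String)
    (nodes : List String) :
    ∀ x, x ∈ (pvVisit g r nodes).1 ↔ x ∈ r ∨ ∃ s ∈ nodes, pvRA g r s x := by
  fun_induction pvVisit g r nodes with
  | case1 r => intro x; simp
  | case2 r n rest hc o ih =>
    intro x
    have hn : n ∈ r := (PySem.Set.contains_iff r n).1 hc
    refine (ih x).trans ?_
    simp only [List.mem_cons]
    constructor
    · rintro (hx | ⟨s, hs, hsx⟩)
      · exact Or.inl hx
      · exact Or.inr ⟨s, Or.inr hs, hsx⟩
    · rintro (hx | ⟨s, rfl | hs, hsx⟩)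
      · exact Or.inl hx
      · exact absurd hn (pvRA_not_mem hsx)
      · exact Or.inr ⟨s, hs, hsx⟩
  | case3 r n rest hc i o ih3 ih2 ih1 =>
    intro x
    have hn : n ∉ r := fun hm => hc ((PySem.Set.contains_iff r n).2 hm)
    have hR : ∀ y, y ∈ (pvVisit g (PySem.Set.add r n) (pvGetB g n)).1 ↔
        (y ∈ r ∨ pvRA g r n y) :=
      fun y => (ih3 y).trans (pvRA_hop (g := g) hn).symm
    refine (ih1 x).trans ?_
    simp only [List.mem_cons]
    constructor
    · rintro (hx | ⟨s, hs, hsx⟩)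
      · rcases (hR x).1 hx with h | h
        · exact Or.inl h
        · exact Or.inr ⟨n, Or.inl rfl, h⟩
      · rcases (pvRA_absorb _ hR s x).1 (Or.inr hsx) with h | h
        · rcases (hR x).1 h with h2 | h2
          · exact Or.inl h2
          · exact Or.inr ⟨n, Or.inl rfl, h2⟩
        · exact Or.inr ⟨s, Or.inr hs, h⟩
    · rintro (hx | ⟨s, rfl | hs, hsx⟩)
      · exact Or.inl ((hR x).2 (Or.inl hx))
      · exact Or.inl ((hR x).2 (Or.inr hsx))
      · rcases (pvRA_absorb _ hR s x).2 (Or.inr hsx) with h | h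
        · exact Or.inl h
        · exact Or.inr ⟨s, hs, h⟩

theorem pvReach_same (g : List (String × List String)) (start : String) (x : String) :
    x ∈ pvLoopA g PySem.Set.empty [start] ↔ x ∈ (pvVisit g PySem.Set.empty [start]).1 := by
  rw [pvLoopA_mem g PySem.Set.empty [start] x, pvVisit_mem g PySem.Set.empty [start] x]

theorem pvContains_same (g : List (String × List String)) (start : String) (y : String) :
    PySem.Set.contains (pvLoopA g PySem.Set.empty [start]) y
      = PySem.Set.contains ((pvVisit g PySem.Set.empty [start]).1) y := by
  cases h1 : PySem.Set.contains (pvLoopA g PySem.Set.empty [start]) y <;>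
    cases h2 : PySem.Set.contains ((pvVisit g PySem.Set.empty [start]).1) y <;> try rfl
  · have := (PySem.Set.contains_iff (pvLoopA g PySem.Set.empty [start]) y).2
      ((pvReach_same g start y).2 ((PySem.Set.contains_iff _ y).1 h2))
    rw [this] at h1
    cases h1
  · have := (PySem.Set.contains_iff ((pvVisit g PySem.Set.empty [start]).1) y).2
      ((pvReach_same g start y).1 ((PySem.Set.contains_iff _ y).1 h1))
    rw [this] at h2
    cases h2

-- ===== VERDICT (by name: the statement is the Claim_ definition above) =====
theorem filter_reachable_states_spec : Claim_equal_filter_reachable_states := by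
  intro g start _
  unfold Spec_filter_reachable_states filter_reachable_states filter_reachable_states_alt
  simp only [pvContains_same g start]
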